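-- pv_equiv track=rewrite | github.com/demeet2k/autoresearch | run_enhanced.py | classify_diff
-- ===== SOURCE A (Python) =====
-- def classify_diff(diff: str) -> tuple[str, list[str]]:
--     """
--     Classify a git diff into action type and tags.
--     This is how the meta-observer learns WHAT KIND of change was made.
--     """
--     diff_lower = diff.lower()
--     tags = []
--     action_type = "unknown"
--
--     # Learning rate changes
--     if any(k in diff_lower for k in ["_lr", "learning_rate", "lr ="]):
--         action_type = "hyperparameter_lr"
--         tags.append("lr")
--         if "embedding_lr" in diff_lower:
--             tags.append("embedding_lr")
--         if "matrix_lr" in diff_lower: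
--             tags.append("matrix_lr")
--         if "scalar_lr" in diff_lower:
--             tags.append("scalar_lr")
--
--     # Batch size changes
--     elif any(k in diff_lower for k in ["batch_size", "total_batch", "device_batch"]):
--         action_type = "hyperparameter_batch"
--         tags.append("batch_size")
--
--     # Architecture depth
--     elif any(k in diff_lower for k in ["n_layer", "depth", "num_layers"]):
--         action_type = "architecture_depth"
--         tags.append("depth")
--
--     # Architecture width
--     elif any(k in diff_lower for k in ["n_embd", "n_head", "head_dim", "aspect_ratio"]):
--         action_type = "architecture_width"
--         tags.append("width")
--
--     # Attention changes
--     elif any(k in diff_lower for k in ["attention", "n_kv_head", "window_pattern", "rope", "flash"]):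
--         action_type = "architecture_attention"
--         tags.append("attention")
--
--     # Optimizer changes
--     elif any(k in diff_lower for k in ["optimizer", "adam", "muon", "momentum", "beta"]):
--         action_type = "optimizer_config"
--         tags.append("optimizer")
--
--     # Scheduler changes
--     elif any(k in diff_lower for k in ["warmup", "warmdown", "schedule", "final_lr"]):
--         if "warmup" in diff_lower:
--             action_type = "scheduler_warmup"
--             tags.append("warmup")
--         else:
--             action_type = "scheduler_decay"
--             tags.append("decay")
--
--     # Regularization
--     elif any(k in diff_lower for k in ["weight_decay", "dropout", "regulariz"]):
--         action_type = "regularization"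
--         tags.append("regularization")
--
--     # Activation function
--     elif any(k in diff_lower for k in ["relu", "gelu", "silu", "activation", "swish"]):
--         action_type = "activation_function"
--         tags.append("activation")
--
--     # Normalization
--     elif any(k in diff_lower for k in ["rmsnorm", "layernorm", "norm"]):
--         action_type = "normalization"
--         tags.append("normalization")
--
--     # Multiple changes
--     if len(tags) == 0:
--         action_type = "mixed_change"
--         tags.append("multi")
--
--     return action_type, tags
-- ===== SOURCE B (Python) =====
-- # Flat keyword -> priority-category index (0 = highest priority).
-- KEYWORD_CAT = [
--     ("_lr", 0), ("learning_rate", 0), ("lr =", 0),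
--     ("batch_size", 1), ("total_batch", 1), ("device_batch", 1),
--     ("n_layer", 2), ("depth", 2), ("num_layers", 2),
--     ("n_embd", 3), ("n_head", 3), ("head_dim", 3), ("aspect_ratio", 3),
--     ("attention", 4), ("n_kv_head", 4), ("window_pattern", 4), ("rope", 4), ("flash", 4),
--     ("optimizer", 5), ("adam", 5), ("muon", 5), ("momentum", 5), ("beta", 5),
--     ("warmup", 6), ("warmdown", 6), ("schedule", 6), ("final_lr", 6),
--     ("weight_decay", 7), ("dropout", 7), ("regulariz", 7),
--     ("relu", 8), ("gelu", 8), ("silu", 8), ("activation", 8), ("swish", 8),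
--     ("rmsnorm", 9), ("layernorm", 9), ("norm", 9),
-- ]
--
-- # Output for the uniform categories (0 and 6 are computed specially below).
-- OUT = {
--     1: ("hyperparameter_batch", ["batch_size"]),
--     2: ("architecture_depth", ["depth"]),
--     3: ("architecture_width", ["width"]),
--     4: ("architecture_attention", ["attention"]),
--     5: ("optimizer_config", ["optimizer"]),
--     7: ("regularization", ["regularization"]),
--     8: ("activation_function", ["activation"]),
--     9: ("normalization", ["normalization"]),
-- }
--
--
-- def classify_diff(diff: str) -> tuple[str, list[str]]:
--     """Collect ALL matched categories into a set, then answer for the minimum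
--     (= highest-priority) one; correct because A's elif chain picks exactly the
--     first group, in index order, containing a matching keyword."""
--     d = diff.lower()
--     hits = {cat for kw, cat in KEYWORD_CAT if kw in d}
--     if not hits:
--         return "mixed_change", ["multi"]
--     cat = min(hits)
--     if cat == 0:
--         return "hyperparameter_lr", ["lr"] + [t for t in ("embedding_lr", "matrix_lr", "scalar_lr") if t in d]
--     if cat == 6:
--         return ("scheduler_warmup", ["warmup"]) if "warmup" in d else ("scheduler_decay", ["decay"])
--     act, tags = OUT[cat]
--     return act, list(tags)
-- ===== Notes on version B (the rewrite author's own statement) =====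
-- stated objective: alternative
-- what changed: Instead of A's short-circuiting if/elif cascade, B builds the full set of matched categories from a flat keyword-to-category index in one pass and then selects min(hits), mapping that category to the answer via a lookup table (with lr sub-tags and the warmup/decay split computed for categories 0 and 6).
import Mathlib
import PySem

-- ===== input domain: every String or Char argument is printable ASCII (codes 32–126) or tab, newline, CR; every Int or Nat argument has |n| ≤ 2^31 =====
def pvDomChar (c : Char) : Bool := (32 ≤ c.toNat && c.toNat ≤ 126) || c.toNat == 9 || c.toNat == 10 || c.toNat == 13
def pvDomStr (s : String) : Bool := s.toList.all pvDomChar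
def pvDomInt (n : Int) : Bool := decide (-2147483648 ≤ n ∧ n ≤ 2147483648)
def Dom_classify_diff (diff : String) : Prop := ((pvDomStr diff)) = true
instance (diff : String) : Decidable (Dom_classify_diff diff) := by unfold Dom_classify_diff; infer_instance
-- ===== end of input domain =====

-- B replaces A's short-circuiting if/elif cascade by: build the set of ALL matched categories from a flat keyword index, take the minimum (alternative decomposition, same cost).


-- ===== PORT A =====
def classify_diff (diff : String) : String × List String :=
  let diff_lower := PySem.Str.lower diff
  let tags : List String := []
  let action_type := "unknown"
  let (action_type, tags) :=
    if ["_lr", "learning_rate", "lr ="].any (fun k => PySem.Str.isIn k diff_lower) then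
      let tags := tags ++ ["lr"]
      let tags := if PySem.Str.isIn "embedding_lr" diff_lower then tags ++ ["embedding_lr"] else tags
      let tags := if PySem.Str.isIn "matrix_lr" diff_lower then tags ++ ["matrix_lr"] else tags
      let tags := if PySem.Str.isIn "scalar_lr" diff_lower then tags ++ ["scalar_lr"] else tags
      ("hyperparameter_lr", tags)
    else if ["batch_size", "total_batch", "device_batch"].any (fun k => PySem.Str.isIn k diff_lower) then
      ("hyperparameter_batch", tags ++ ["batch_size"])
    else if ["n_layer", "depth", "num_layers"].any (fun k => PySem.Str.isIn k diff_lower) then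
      ("architecture_depth", tags ++ ["depth"])
    else if ["n_embd", "n_head", "head_dim", "aspect_ratio"].any (fun k => PySem.Str.isIn k diff_lower) then
      ("architecture_width", tags ++ ["width"])
    else if ["attention", "n_kv_head", "window_pattern", "rope", "flash"].any (fun k => PySem.Str.isIn k diff_lower) then
      ("architecture_attention", tags ++ ["attention"])
    else if ["optimizer", "adam", "muon", "momentum", "beta"].any (fun k => PySem.Str.isIn k diff_lower) then
      ("optimizer_config", tags ++ ["optimizer"])
    else if ["warmup", "warmdown", "schedule", "final_lr"].any (fun k => PySem.Str.isIn k diff_lower) then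
      if PySem.Str.isIn "warmup" diff_lower then
        ("scheduler_warmup", tags ++ ["warmup"])
      else
        ("scheduler_decay", tags ++ ["decay"])
    else if ["weight_decay", "dropout", "regulariz"].any (fun k => PySem.Str.isIn k diff_lower) then
      ("regularization", tags ++ ["regularization"])
    else if ["relu", "gelu", "silu", "activation", "swish"].any (fun k => PySem.Str.isIn k diff_lower) then
      ("activation_function", tags ++ ["activation"])
    else if ["rmsnorm", "layernorm", "norm"].any (fun k => PySem.Str.isIn k diff_lower) then
      ("normalization", tags ++ ["normalization"])
    else (action_type, tags)
  if tags.length == 0 then ("mixed_change", tags ++ ["multi"]) else (action_type, tags)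

-- ===== PORT B =====
def pvKwCat : List (String × Nat) :=
  [ ("_lr", 0), ("learning_rate", 0), ("lr =", 0),
    ("batch_size", 1), ("total_batch", 1), ("device_batch", 1),
    ("n_layer", 2), ("depth", 2), ("num_layers", 2),
    ("n_embd", 3), ("n_head", 3), ("head_dim", 3), ("aspect_ratio", 3),
    ("attention", 4), ("n_kv_head", 4), ("window_pattern", 4), ("rope", 4), ("flash", 4),
    ("optimizer", 5), ("adam", 5), ("muon", 5), ("momentum", 5), ("beta", 5),
    ("warmup", 6), ("warmdown", 6), ("schedule", 6), ("final_lr", 6),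
    ("weight_decay", 7), ("dropout", 7), ("regulariz", 7),
    ("relu", 8), ("gelu", 8), ("silu", 8), ("activation", 8), ("swish", 8),
    ("rmsnorm", 9), ("layernorm", 9), ("norm", 9) ]

def pvOutTbl : PySem.Dict Nat (String × List String) :=
  PySem.Dict.ofList [ (1, ("hyperparameter_batch", ["batch_size"])),
    (2, ("architecture_depth", ["depth"])),
    (3, ("architecture_width", ["width"])),
    (4, ("architecture_attention", ["attention"])),
    (5, ("optimizer_config", ["optimizer"])),
    (7, ("regularization", ["regularization"])),
    (8, ("activation_function", ["activation"])),
    (9, ("normalization", ["normalization"])) ]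

def pvHits (d : String) : PySem.Set Nat :=
  PySem.Set.ofList ((pvKwCat.filter (fun p => PySem.Str.isIn p.1 d)).map Prod.snd)

def classify_diff_alt (diff : String) : String × List String :=
  let d := PySem.Str.lower diff
  let hits := pvHits d
  match PySem.List.min? hits (fun x => x) with
  | none => ("mixed_change", ["multi"])
  | some cat =>
    if cat == 0 then
      ("hyperparameter_lr", "lr" :: (["embedding_lr", "matrix_lr", "scalar_lr"].filter (fun t => PySem.Str.isIn t d)))
    else if cat == 6 then
      (if PySem.Str.isIn "warmup" d then ("scheduler_warmup", ["warmup"]) else ("scheduler_decay", ["decay"]))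
    else
      -- OUT[cat]: the table contains every category other than 0 and 6, so the none arm is unreachable
      match PySem.Dict.get? pvOutTbl cat with
      | some (act, tags) => (act, tags)
      | none => ("", [])

-- ===== PRECONDITION & SPEC =====
def Spec_classify_diff (diff : String) (out : String × List String) : Prop := out = classify_diff_alt diff
instance (diff : String) (out : String × List String) : Decidable (Spec_classify_diff diff out) := by unfold Spec_classify_diff; infer_instance

-- ===== CLAIM =====
def Claim_equal_classify_diff : Prop := ∀ (diff : String), Dom_classify_diff diff → Spec_classify_diff diff (classify_diff diff)

-- ===== LEMMAS AND PROOFS =====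
theorem min?_id_eq_some (l : List Nat) (g : Nat) (hg : g ∈ l) (hmin : ∀ x ∈ l, g ≤ x) :
    PySem.List.min? l (fun x => x) = some g := by
  cases h : PySem.List.min? l (fun x => x) with
  | none =>
    rw [PySem.List.min?_eq_none_iff] at h
    subst h; cases hg
  | some m =>
    have hm := PySem.List.min?_mem h
    have h1 : m ≤ g := by simpa using PySem.List.min?_isMin h g hg
    have h2 := hmin m hm
    have : m = g := le_antisymm h1 h2
    rw [this]

theorem mem_of_kw (d kw : String) (c : Nat) (hin : (kw, c) ∈ pvKwCat) (h : PySem.Str.isIn kw d = true) : c ∈ pvHits d := by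
  simp only [pvHits, PySem.Set.mem_ofList, List.mem_map, List.mem_filter]
  exact ⟨(kw, c), ⟨hin, h⟩, rfl⟩

theorem pvKwCat_cases (kw : String) (c : Nat) (h : (kw, c) ∈ pvKwCat) :
    (c = 0 ∧ kw ∈ ["_lr", "learning_rate", "lr ="]) ∨
    (c = 1 ∧ kw ∈ ["batch_size", "total_batch", "device_batch"]) ∨
    (c = 2 ∧ kw ∈ ["n_layer", "depth", "num_layers"]) ∨
    (c = 3 ∧ kw ∈ ["n_embd", "n_head", "head_dim", "aspect_ratio"]) ∨
    (c = 4 ∧ kw ∈ ["attention", "n_kv_head", "window_pattern", "rope", "flash"]) ∨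
    (c = 5 ∧ kw ∈ ["optimizer", "adam", "muon", "momentum", "beta"]) ∨
    (c = 6 ∧ kw ∈ ["warmup", "warmdown", "schedule", "final_lr"]) ∨
    (c = 7 ∧ kw ∈ ["weight_decay", "dropout", "regulariz"]) ∨
    (c = 8 ∧ kw ∈ ["relu", "gelu", "silu", "activation", "swish"]) ∨
    (c = 9 ∧ kw ∈ ["rmsnorm", "layernorm", "norm"]) := by
  fin_cases h <;> simp

theorem mem_pvHits (d : String) (x : Nat) : x ∈ pvHits d ↔
    (x = 0 ∧ (["_lr", "learning_rate", "lr ="].any (fun k => PySem.Str.isIn k d)) = true) ∨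
    (x = 1 ∧ (["batch_size", "total_batch", "device_batch"].any (fun k => PySem.Str.isIn k d)) = true) ∨
    (x = 2 ∧ (["n_layer", "depth", "num_layers"].any (fun k => PySem.Str.isIn k d)) = true) ∨
    (x = 3 ∧ (["n_embd", "n_head", "head_dim", "aspect_ratio"].any (fun k => PySem.Str.isIn k d)) = true) ∨
    (x = 4 ∧ (["attention", "n_kv_head", "window_pattern", "rope", "flash"].any (fun k => PySem.Str.isIn k d)) = true) ∨
    (x = 5 ∧ (["optimizer", "adam", "muon", "momentum", "beta"].any (fun k => PySem.Str.isIn k d)) = true) ∨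
    (x = 6 ∧ (["warmup", "warmdown", "schedule", "final_lr"].any (fun k => PySem.Str.isIn k d)) = true) ∨
    (x = 7 ∧ (["weight_decay", "dropout", "regulariz"].any (fun k => PySem.Str.isIn k d)) = true) ∨
    (x = 8 ∧ (["relu", "gelu", "silu", "activation", "swish"].any (fun k => PySem.Str.isIn k d)) = true) ∨
    (x = 9 ∧ (["rmsnorm", "layernorm", "norm"].any (fun k => PySem.Str.isIn k d)) = true) := by
  constructor
  · intro hx
    simp only [pvHits, PySem.Set.mem_ofList, List.mem_map, List.mem_filter] at hx
    obtain ⟨⟨kw, c⟩, ⟨hin, hik⟩, rfl⟩ := hx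
    rcases pvKwCat_cases kw c hin with (⟨rfl, hk⟩|⟨rfl, hk⟩|⟨rfl, hk⟩|⟨rfl, hk⟩|⟨rfl, hk⟩|⟨rfl, hk⟩|⟨rfl, hk⟩|⟨rfl, hk⟩|⟨rfl, hk⟩|⟨rfl, hk⟩)
    · exact Or.inl ⟨rfl, List.any_eq_true.mpr ⟨kw, hk, hik⟩⟩
    · exact Or.inr (Or.inl ⟨rfl, List.any_eq_true.mpr ⟨kw, hk, hik⟩⟩)
    · exact Or.inr (Or.inr (Or.inl ⟨rfl, List.any_eq_true.mpr ⟨kw, hk, hik⟩⟩))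
    · exact Or.inr (Or.inr (Or.inr (Or.inl ⟨rfl, List.any_eq_true.mpr ⟨kw, hk, hik⟩⟩)))
    · exact Or.inr (Or.inr (Or.inr (Or.inr (Or.inl ⟨rfl, List.any_eq_true.mpr ⟨kw, hk, hik⟩⟩))))
    · exact Or.inr (Or.inr (Or.inr (Or.inr (Or.inr (Or.inl ⟨rfl, List.any_eq_true.mpr ⟨kw, hk, hik⟩⟩)))))
    · exact Or.inr (Or.inr (Or.inr (Or.inr (Or.inr (Or.inr (Or.inl ⟨rfl, List.any_eq_true.mpr ⟨kw, hk, hik⟩⟩))))))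
    · exact Or.inr (Or.inr (Or.inr (Or.inr (Or.inr (Or.inr (Or.inr (Or.inl ⟨rfl, List.any_eq_true.mpr ⟨kw, hk, hik⟩⟩)))))))
    · exact Or.inr (Or.inr (Or.inr (Or.inr (Or.inr (Or.inr (Or.inr (Or.inr (Or.inl ⟨rfl, List.any_eq_true.mpr ⟨kw, hk, hik⟩⟩))))))))
    · exact Or.inr (Or.inr (Or.inr (Or.inr (Or.inr (Or.inr (Or.inr (Or.inr (Or.inr (⟨rfl, List.any_eq_true.mpr ⟨kw, hk, hik⟩⟩)))))))))
  · rintro (⟨rfl, hg⟩|⟨rfl, hg⟩|⟨rfl, hg⟩|⟨rfl, hg⟩|⟨rfl, hg⟩|⟨rfl, hg⟩|⟨rfl, hg⟩|⟨rfl, hg⟩|⟨rfl, hg⟩|⟨rfl, hg⟩)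
    · obtain ⟨k, hk, hik⟩ := List.any_eq_true.mp hg
      exact mem_of_kw d k 0 (by fin_cases hk <;> decide) hik
    · obtain ⟨k, hk, hik⟩ := List.any_eq_true.mp hg
      exact mem_of_kw d k 1 (by fin_cases hk <;> decide) hik
    · obtain ⟨k, hk, hik⟩ := List.any_eq_true.mp hg
      exact mem_of_kw d k 2 (by fin_cases hk <;> decide) hik
    · obtain ⟨k, hk, hik⟩ := List.any_eq_true.mp hg
      exact mem_of_kw d k 3 (by fin_cases hk <;> decide) hik
    · obtain ⟨k, hk, hik⟩ := List.any_eq_true.mp hg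
      exact mem_of_kw d k 4 (by fin_cases hk <;> decide) hik
    · obtain ⟨k, hk, hik⟩ := List.any_eq_true.mp hg
      exact mem_of_kw d k 5 (by fin_cases hk <;> decide) hik
    · obtain ⟨k, hk, hik⟩ := List.any_eq_true.mp hg
      exact mem_of_kw d k 6 (by fin_cases hk <;> decide) hik
    · obtain ⟨k, hk, hik⟩ := List.any_eq_true.mp hg
      exact mem_of_kw d k 7 (by fin_cases hk <;> decide) hik
    · obtain ⟨k, hk, hik⟩ := List.any_eq_true.mp hg
      exact mem_of_kw d k 8 (by fin_cases hk <;> decide) hik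
    · obtain ⟨k, hk, hik⟩ := List.any_eq_true.mp hg
      exact mem_of_kw d k 9 (by fin_cases hk <;> decide) hik

set_option maxHeartbeats 2000000 in
theorem classify_eq (diff : String) : classify_diff diff = classify_diff_alt diff := by
  unfold classify_diff classify_diff_alt
  generalize PySem.Str.lower diff = d
  by_cases h1 : (["_lr", "learning_rate", "lr ="].any fun k => PySem.Str.isIn k d) = true
  · -- category 0 matches
    have hmem : (0 : Nat) ∈ pvHits d := (mem_pvHits d 0).mpr (Or.inl ⟨rfl, h1⟩)
    have hmin : ∀ x ∈ pvHits d, 0 ≤ x := by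
      intro x hx
      rcases (mem_pvHits d x).mp hx with (⟨rfl, h⟩|⟨rfl, h⟩|⟨rfl, h⟩|⟨rfl, h⟩|⟨rfl, h⟩|⟨rfl, h⟩|⟨rfl, h⟩|⟨rfl, h⟩|⟨rfl, h⟩|⟨rfl, h⟩)
      · omega
      · omega
      · omega
      · omega
      · omega
      · omega
      · omega
      · omega
      · omega
      · omega
    have hq : PySem.List.min? (pvHits d) (fun x => x) = some 0 := min?_id_eq_some (pvHits d) 0 hmem hmin
    by_cases he : PySem.Str.isIn "embedding_lr" d = true <;>
      by_cases hm : PySem.Str.isIn "matrix_lr" d = true <;>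
        by_cases hs : PySem.Str.isIn "scalar_lr" d = true <;>
          (simp only [h1, hq, he, hm, hs, List.filter_cons, List.filter_nil]; rfl)
  · -- no keyword of category 0
    by_cases h2 : (["batch_size", "total_batch", "device_batch"].any fun k => PySem.Str.isIn k d) = true
    · -- category 1 matches
      have hmem : (1 : Nat) ∈ pvHits d := (mem_pvHits d 1).mpr (Or.inr (Or.inl ⟨rfl, h2⟩))
      have hmin : ∀ x ∈ pvHits d, 1 ≤ x := by
        intro x hx
        rcases (mem_pvHits d x).mp hx with (⟨rfl, h⟩|⟨rfl, h⟩|⟨rfl, h⟩|⟨rfl, h⟩|⟨rfl, h⟩|⟨rfl, h⟩|⟨rfl, h⟩|⟨rfl, h⟩|⟨rfl, h⟩|⟨rfl, h⟩)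
        · exact absurd h h1
        · omega
        · omega
        · omega
        · omega
        · omega
        · omega
        · omega
        · omega
        · omega
      have hq : PySem.List.min? (pvHits d) (fun x => x) = some 1 := min?_id_eq_some (pvHits d) 1 hmem hmin
      simp only [h1, h2, hq]
      rfl
    · -- no keyword of category 1
      by_cases h3 : (["n_layer", "depth", "num_layers"].any fun k => PySem.Str.isIn k d) = true
      · -- category 2 matches
        have hmem : (2 : Nat) ∈ pvHits d := (mem_pvHits d 2).mpr (Or.inr (Or.inr (Or.inl ⟨rfl, h3⟩)))
        have hmin : ∀ x ∈ pvHits d, 2 ≤ x := by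
          intro x hx
          rcases (mem_pvHits d x).mp hx with (⟨rfl, h⟩|⟨rfl, h⟩|⟨rfl, h⟩|⟨rfl, h⟩|⟨rfl, h⟩|⟨rfl, h⟩|⟨rfl, h⟩|⟨rfl, h⟩|⟨rfl, h⟩|⟨rfl, h⟩)
          · exact absurd h h1
          · exact absurd h h2
          · omega
          · omega
          · omega
          · omega
          · omega
          · omega
          · omega
          · omega
        have hq : PySem.List.min? (pvHits d) (fun x => x) = some 2 := min?_id_eq_some (pvHits d) 2 hmem hmin
        simp only [h1, h2, h3, hq]
        rfl
      · -- no keyword of category 2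
        by_cases h4 : (["n_embd", "n_head", "head_dim", "aspect_ratio"].any fun k => PySem.Str.isIn k d) = true
        · -- category 3 matches
          have hmem : (3 : Nat) ∈ pvHits d := (mem_pvHits d 3).mpr (Or.inr (Or.inr (Or.inr (Or.inl ⟨rfl, h4⟩))))
          have hmin : ∀ x ∈ pvHits d, 3 ≤ x := by
            intro x hx
            rcases (mem_pvHits d x).mp hx with (⟨rfl, h⟩|⟨rfl, h⟩|⟨rfl, h⟩|⟨rfl, h⟩|⟨rfl, h⟩|⟨rfl, h⟩|⟨rfl, h⟩|⟨rfl, h⟩|⟨rfl, h⟩|⟨rfl, h⟩)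
            · exact absurd h h1
            · exact absurd h h2
            · exact absurd h h3
            · omega
            · omega
            · omega
            · omega
            · omega
            · omega
            · omega
          have hq : PySem.List.min? (pvHits d) (fun x => x) = some 3 := min?_id_eq_some (pvHits d) 3 hmem hmin
          simp only [h1, h2, h3, h4, hq]
          rfl
        · -- no keyword of category 3
          by_cases h5 : (["attention", "n_kv_head", "window_pattern", "rope", "flash"].any fun k => PySem.Str.isIn k d) = true
          · -- category 4 matches
            have hmem : (4 : Nat) ∈ pvHits d := (mem_pvHits d 4).mpr (Or.inr (Or.inr (Or.inr (Or.inr (Or.inl ⟨rfl, h5⟩)))))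
            have hmin : ∀ x ∈ pvHits d, 4 ≤ x := by
              intro x hx
              rcases (mem_pvHits d x).mp hx with (⟨rfl, h⟩|⟨rfl, h⟩|⟨rfl, h⟩|⟨rfl, h⟩|⟨rfl, h⟩|⟨rfl, h⟩|⟨rfl, h⟩|⟨rfl, h⟩|⟨rfl, h⟩|⟨rfl, h⟩)
              · exact absurd h h1
              · exact absurd h h2
              · exact absurd h h3
              · exact absurd h h4
              · omega
              · omega
              · omega
              · omega
              · omega
              · omega
            have hq : PySem.List.min? (pvHits d) (fun x => x) = some 4 := min?_id_eq_some (pvHits d) 4 hmem hmin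
            simp only [h1, h2, h3, h4, h5, hq]
            rfl
          · -- no keyword of category 4
            by_cases h6 : (["optimizer", "adam", "muon", "momentum", "beta"].any fun k => PySem.Str.isIn k d) = true
            · -- category 5 matches
              have hmem : (5 : Nat) ∈ pvHits d := (mem_pvHits d 5).mpr (Or.inr (Or.inr (Or.inr (Or.inr (Or.inr (Or.inl ⟨rfl, h6⟩))))))
              have hmin : ∀ x ∈ pvHits d, 5 ≤ x := by
                intro x hx
                rcases (mem_pvHits d x).mp hx with (⟨rfl, h⟩|⟨rfl, h⟩|⟨rfl, h⟩|⟨rfl, h⟩|⟨rfl, h⟩|⟨rfl, h⟩|⟨rfl, h⟩|⟨rfl, h⟩|⟨rfl, h⟩|⟨rfl, h⟩)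
                · exact absurd h h1
                · exact absurd h h2
                · exact absurd h h3
                · exact absurd h h4
                · exact absurd h h5
                · omega
                · omega
                · omega
                · omega
                · omega
              have hq : PySem.List.min? (pvHits d) (fun x => x) = some 5 := min?_id_eq_some (pvHits d) 5 hmem hmin
              simp only [h1, h2, h3, h4, h5, h6, hq]
              rfl
            · -- no keyword of category 5
              by_cases h7 : (["warmup", "warmdown", "schedule", "final_lr"].any fun k => PySem.Str.isIn k d) = true
              · -- category 6 matches
                have hmem : (6 : Nat) ∈ pvHits d := (mem_pvHits d 6).mpr (Or.inr (Or.inr (Or.inr (Or.inr (Or.inr (Or.inr (Or.inl ⟨rfl, h7⟩)))))))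
                have hmin : ∀ x ∈ pvHits d, 6 ≤ x := by
                  intro x hx
                  rcases (mem_pvHits d x).mp hx with (⟨rfl, h⟩|⟨rfl, h⟩|⟨rfl, h⟩|⟨rfl, h⟩|⟨rfl, h⟩|⟨rfl, h⟩|⟨rfl, h⟩|⟨rfl, h⟩|⟨rfl, h⟩|⟨rfl, h⟩)
                  · exact absurd h h1
                  · exact absurd h h2
                  · exact absurd h h3
                  · exact absurd h h4
                  · exact absurd h h5
                  · exact absurd h h6
                  · omega
                  · omega
                  · omega
                  · omega
                have hq : PySem.List.min? (pvHits d) (fun x => x) = some 6 := min?_id_eq_some (pvHits d) 6 hmem hmin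
                by_cases hw : PySem.Str.isIn "warmup" d = true <;>
                  (simp only [h1, h2, h3, h4, h5, h6, h7, hq, hw]; rfl)
              · -- no keyword of category 6
                by_cases h8 : (["weight_decay", "dropout", "regulariz"].any fun k => PySem.Str.isIn k d) = true
                · -- category 7 matches
                  have hmem : (7 : Nat) ∈ pvHits d := (mem_pvHits d 7).mpr (Or.inr (Or.inr (Or.inr (Or.inr (Or.inr (Or.inr (Or.inr (Or.inl ⟨rfl, h8⟩))))))))
                  have hmin : ∀ x ∈ pvHits d, 7 ≤ x := by
                    intro x hx
                    rcases (mem_pvHits d x).mp hx with (⟨rfl, h⟩|⟨rfl, h⟩|⟨rfl, h⟩|⟨rfl, h⟩|⟨rfl, h⟩|⟨rfl, h⟩|⟨rfl, h⟩|⟨rfl, h⟩|⟨rfl, h⟩|⟨rfl, h⟩)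
                    · exact absurd h h1
                    · exact absurd h h2
                    · exact absurd h h3
                    · exact absurd h h4
                    · exact absurd h h5
                    · exact absurd h h6
                    · exact absurd h h7
                    · omega
                    · omega
                    · omega
                  have hq : PySem.List.min? (pvHits d) (fun x => x) = some 7 := min?_id_eq_some (pvHits d) 7 hmem hmin
                  simp only [h1, h2, h3, h4, h5, h6, h7, h8, hq]
                  rfl
                · -- no keyword of category 7
                  by_cases h9 : (["relu", "gelu", "silu", "activation", "swish"].any fun k => PySem.Str.isIn k d) = true
                  · -- category 8 matches
                    have hmem : (8 : Nat) ∈ pvHits d := (mem_pvHits d 8).mpr (Or.inr (Or.inr (Or.inr (Or.inr (Or.inr (Or.inr (Or.inr (Or.inr (Or.inl ⟨rfl, h9⟩)))))))))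
                    have hmin : ∀ x ∈ pvHits d, 8 ≤ x := by
                      intro x hx
                      rcases (mem_pvHits d x).mp hx with (⟨rfl, h⟩|⟨rfl, h⟩|⟨rfl, h⟩|⟨rfl, h⟩|⟨rfl, h⟩|⟨rfl, h⟩|⟨rfl, h⟩|⟨rfl, h⟩|⟨rfl, h⟩|⟨rfl, h⟩)
                      · exact absurd h h1
                      · exact absurd h h2
                      · exact absurd h h3
                      · exact absurd h h4
                      · exact absurd h h5
                      · exact absurd h h6
                      · exact absurd h h7
                      · exact absurd h h8
                      · omega
                      · omega
                    have hq : PySem.List.min? (pvHits d) (fun x => x) = some 8 := min?_id_eq_some (pvHits d) 8 hmem hmin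
                    simp only [h1, h2, h3, h4, h5, h6, h7, h8, h9, hq]
                    rfl
                  · -- no keyword of category 8
                    by_cases h10 : (["rmsnorm", "layernorm", "norm"].any fun k => PySem.Str.isIn k d) = true
                    · -- category 9 matches
                      have hmem : (9 : Nat) ∈ pvHits d := (mem_pvHits d 9).mpr (Or.inr (Or.inr (Or.inr (Or.inr (Or.inr (Or.inr (Or.inr (Or.inr (Or.inr (⟨rfl, h10⟩))))))))))
                      have hmin : ∀ x ∈ pvHits d, 9 ≤ x := by
                        intro x hx
                        rcases (mem_pvHits d x).mp hx with (⟨rfl, h⟩|⟨rfl, h⟩|⟨rfl, h⟩|⟨rfl, h⟩|⟨rfl, h⟩|⟨rfl, h⟩|⟨rfl, h⟩|⟨rfl, h⟩|⟨rfl, h⟩|⟨rfl, h⟩)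
                        · exact absurd h h1
                        · exact absurd h h2
                        · exact absurd h h3
                        · exact absurd h h4
                        · exact absurd h h5
                        · exact absurd h h6
                        · exact absurd h h7
                        · exact absurd h h8
                        · exact absurd h h9
                        · omega
                      have hq : PySem.List.min? (pvHits d) (fun x => x) = some 9 := min?_id_eq_some (pvHits d) 9 hmem hmin
                      simp only [h1, h2, h3, h4, h5, h6, h7, h8, h9, h10, hq]
                      rfl
                    · -- no keyword of category 9
                      have hempty : pvHits d = [] := by
                        rw [List.eq_nil_iff_forall_not_mem]
                        intro x hx
                        rcases (mem_pvHits d x).mp hx with (⟨rfl, h⟩|⟨rfl, h⟩|⟨rfl, h⟩|⟨rfl, h⟩|⟨rfl, h⟩|⟨rfl, h⟩|⟨rfl, h⟩|⟨rfl, h⟩|⟨rfl, h⟩|⟨rfl, h⟩)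
                        · exact absurd h h1
                        · exact absurd h h2
                        · exact absurd h h3
                        · exact absurd h h4
                        · exact absurd h h5
                        · exact absurd h h6
                        · exact absurd h h7
                        · exact absurd h h8
                        · exact absurd h h9
                        · exact absurd h h10
                      have hq : PySem.List.min? (pvHits d) (fun x => x) = none := (PySem.List.min?_eq_none_iff (pvHits d) (fun x => x)).mpr hempty
                      simp only [h1, h2, h3, h4, h5, h6, h7, h8, h9, h10, hq]
                      rfl

-- ===== VERDICT =====
theorem classify_diff_spec : Claim_equal_classify_diff := by
  intro diff _
  exact classify_eq diff
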